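-- pv_equiv track=rewrite | github.com/joel-da-silva-cavalcanti-filho/Genetic-Algorithm-based-Optimization-for-Quantum-Circuit-Architecture | src/genetic_algo/ansatz_optimization_problem.py | generate_disjoint_cnots
-- ===== SOURCE A (Python) =====
-- def generate_disjoint_cnots(n_qubits):
--     cnot_count_layer_one = 0
--     cnot_count_layer_two = 0
--     layer_one = []
--     layer_two = []
--     for wire in range(n_qubits):
--         if wire%2 == 0:
--             layer_one.append(f'ctrl_{cnot_count_layer_one}')
--             if wire != 0:
--                 layer_two.append(f'trgt_{cnot_count_layer_two}')
--                 cnot_count_layer_two+=1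
--         else:
--             layer_one.append(f'trgt_{cnot_count_layer_one}')
--             layer_two.append(f'ctrl_{cnot_count_layer_two}')
--             cnot_count_layer_one += 1
--
--     return layer_one, layer_two
-- ===== SOURCE B (Python) =====
-- def generate_disjoint_cnots(n_qubits):
--     layer_one = [f"{'ctrl' if i % 2 == 0 else 'trgt'}_{i // 2}" for i in range(n_qubits)]
--     return layer_one, layer_one[:n_qubits - 1]
-- ===== Notes on version B (the rewrite author's own statement) =====
-- stated objective: simpler
-- what changed: Replaced the stateful loop with two counters and two accumulating lists by a direct closed-form comprehension (label of wire i is ctrl/trgt of i//2) and obtained layer_two as the slice layer_one[:n_qubits-1].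
import Mathlib
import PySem

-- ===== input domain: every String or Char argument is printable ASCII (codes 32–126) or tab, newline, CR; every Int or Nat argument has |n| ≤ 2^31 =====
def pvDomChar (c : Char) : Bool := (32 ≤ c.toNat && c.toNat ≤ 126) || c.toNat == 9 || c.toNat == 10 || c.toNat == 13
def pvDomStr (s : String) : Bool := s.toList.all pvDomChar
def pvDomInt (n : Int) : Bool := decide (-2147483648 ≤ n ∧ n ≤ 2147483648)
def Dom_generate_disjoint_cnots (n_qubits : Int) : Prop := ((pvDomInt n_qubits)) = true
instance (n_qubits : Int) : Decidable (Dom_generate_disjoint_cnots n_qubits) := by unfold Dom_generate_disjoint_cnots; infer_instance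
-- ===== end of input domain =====

-- B replaces A's stateful loop (two counters, two growing lists) by a closed-form
-- comprehension for layer_one and the slice layer_one[:n_qubits-1] for layer_two (objective: simpler).

-- ===== PORT A =====
-- one step of A's for-loop body, state = (cnot_count_layer_one, cnot_count_layer_two, layer_one, layer_two)
def gdcStepA (st : Int × Int × List String × List String) (wire : Int) :
    Int × Int × List String × List String :=
  let c1 := st.1; let c2 := st.2.1; let l1 := st.2.2.1; let l2 := st.2.2.2
  if PySem.Int.mod wire 2 == 0 then
    let l1' := l1 ++ ["ctrl_" ++ PySem.Int.toStr c1]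
    if wire != 0 then
      (c1, c2 + 1, l1', l2 ++ ["trgt_" ++ PySem.Int.toStr c2])
    else
      (c1, c2, l1', l2)
  else
    (c1 + 1, c2, l1 ++ ["trgt_" ++ PySem.Int.toStr c1], l2 ++ ["ctrl_" ++ PySem.Int.toStr c2])

def generate_disjoint_cnots (n_qubits : Int) : List String × List String :=
  let st := (PySem.List.pyRange 0 n_qubits 1).foldl gdcStepA (0, 0, [], [])
  (st.2.2.1, st.2.2.2)

-- ===== PORT B =====
-- the f-string label of wire i
def gdcLabel (i : Int) : String :=
  (if PySem.Int.mod i 2 == 0 then "ctrl" else "trgt") ++ "_" ++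
    PySem.Int.toStr (PySem.Int.floordiv i 2)

def generate_disjoint_cnots_alt (n_qubits : Int) : List String × List String :=
  let layer_one := (PySem.List.pyRange 0 n_qubits 1).map gdcLabel
  (layer_one, PySem.List.slice layer_one none (some (n_qubits - 1)))

-- ===== PRECONDITION & SPEC =====
def Spec_generate_disjoint_cnots (n_qubits : Int) (out : List String × List String) : Prop := out = generate_disjoint_cnots_alt n_qubits
instance (n_qubits : Int) (out : List String × List String) : Decidable (Spec_generate_disjoint_cnots n_qubits out) := by unfold Spec_generate_disjoint_cnots; infer_instance

-- ===== CLAIM (what is proved, stated in full; the proofs are below) =====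
def Claim_equal_generate_disjoint_cnots : Prop := ∀ (n_qubits : Int), Dom_generate_disjoint_cnots n_qubits → Spec_generate_disjoint_cnots n_qubits (generate_disjoint_cnots n_qubits)

-- ===== LEMMAS AND PROOFS =====

-- the Nat-indexed label (what gdcLabel computes at a nonnegative wire)
def gdcLabN (k : Nat) : String :=
  if k % 2 == 0 then "ctrl_" ++ PySem.Int.toStr ((k / 2 : Nat) : Int)
  else "trgt_" ++ PySem.Int.toStr ((k / 2 : Nat) : Int)

lemma gdc_mod2 (k : Nat) : PySem.Int.mod (k : Int) 2 = ((k % 2 : Nat) : Int) := by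
  rw [PySem.Int.mod_eq_emod_of_pos (by norm_num : (0:Int) < 2)]; omega

lemma gdc_div2 (k : Nat) : PySem.Int.floordiv (k : Int) 2 = ((k / 2 : Nat) : Int) := by
  rw [PySem.Int.floordiv_eq_ediv_of_pos (by norm_num : (0:Int) < 2)]; omega

lemma gdcLabel_natCast (k : Nat) : gdcLabel (k : Int) = gdcLabN k := by
  simp only [gdcLabel, gdcLabN, gdc_mod2, gdc_div2]
  have hd : ((2:Int) ∣ (k:Int)) ↔ k % 2 = 0 := by omega
  by_cases h : k % 2 = 0 <;> simp [hd, h]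

-- layer_one after processing wires 0..m-1
def gdcL1 (m : Nat) : List String := (List.range m).map gdcLabN

lemma gdcL1_succ (m : Nat) : gdcL1 (m + 1) = gdcL1 m ++ [gdcLabN m] := by
  simp [gdcL1, List.range_succ]

lemma gdcL1_length (m : Nat) : (gdcL1 m).length = m := by simp [gdcL1]

lemma gdc_take_append (m : Nat) (x : String) :
    (gdcL1 m ++ [x]).take m = gdcL1 m := by
  have h := List.take_left (l₁ := gdcL1 m) (l₂ := [x])
  rwa [gdcL1_length] at h

-- the loop invariant for A's fold
lemma gdc_fold_inv (m : Nat) :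
    (List.range m).foldl (fun st (k : Nat) => gdcStepA st (k : Int)) (0, 0, [], []) =
      (((m / 2 : Nat) : Int), (((m - 1) / 2 : Nat) : Int), gdcL1 m, (gdcL1 m).take (m - 1)) := by
  induction m with
  | zero => simp [gdcL1]
  | succ m ih =>
      rw [List.range_succ, List.foldl_append, ih]
      simp only [List.foldl_cons, List.foldl_nil]
      rcases Nat.eq_zero_or_pos m with h0 | h0
      · subst h0
        simp [gdcStepA, gdcL1, gdcLabN, PySem.Int.toStr]
      · obtain ⟨j, rfl⟩ : ∃ j, m = j + 1 := ⟨m - 1, by omega⟩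
        by_cases hm : (j + 1) % 2 = 0
        · -- wire j+1 is even (and nonzero): layer_one gains ctrl, layer_two gains trgt
          have hj : j % 2 = 1 := by omega
          simp only [gdcStepA, gdc_mod2, hm, Nat.cast_zero, beq_self_eq_true, if_true,
                     gdcL1_succ (j + 1), gdcL1_succ j, Nat.add_sub_cancel]
          rw [if_pos (by simp; omega)]
          simp only [Prod.mk.injEq]
          refine ⟨by omega, by omega, ?_, ?_⟩
          · rw [List.append_assoc, List.append_assoc]
            congr 2
            simp [gdcLabN, hm]
          · rw [gdc_take_append, ← gdcL1_succ, gdc_take_append, gdcL1_succ]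
            congr 1
            simp [gdcLabN, hj]
        · -- wire j+1 is odd: layer_one gains trgt, layer_two gains ctrl
          have e2 : j % 2 = 0 := by omega
          simp only [gdcStepA, gdc_mod2, gdcL1_succ (j + 1), gdcL1_succ j, Nat.add_sub_cancel]
          rw [if_neg (by simp; omega)]
          simp only [Prod.mk.injEq]
          refine ⟨by omega, by omega, ?_, ?_⟩
          · rw [List.append_assoc, List.append_assoc]
            congr 2
            simp [gdcLabN, hm]
          · rw [gdc_take_append, ← gdcL1_succ, gdc_take_append, gdcL1_succ]
            congr 1
            simp [gdcLabN, e2]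

-- ===== VERDICT (by name: the statement is the Claim_ definition above) =====
theorem generate_disjoint_cnots_spec : Claim_equal_generate_disjoint_cnots := by
  intro n _
  unfold Spec_generate_disjoint_cnots generate_disjoint_cnots generate_disjoint_cnots_alt
  by_cases hn : n ≤ 0
  · rw [PySem.List.pyRange_one_eq_nil hn]
    simp [PySem.List.slice]
  · obtain ⟨m, rfl⟩ : ∃ m : Nat, n = (m : Int) := ⟨n.toNat, by omega⟩
    have hm : 1 ≤ m := by omega
    rw [PySem.List.pyRange_one]
    simp only [sub_zero, Int.toNat_natCast, zero_add]
    rw [List.foldl_map, gdc_fold_inv]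
    have hmap : ((List.range m).map (fun k : Nat => (k : Int))).map gdcLabel = gdcL1 m := by
      rw [List.map_map]; apply List.map_congr_left; intro k _
      exact gdcLabel_natCast k
    have hsub : ((m : Int) - 1) = ((m - 1 : Nat) : Int) := by omega
    rw [hmap, hsub, PySem.List.slice_to_natCast]
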